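-- pv_equiv track=rewrite | github.com/javiruiz01/Intro-Bio | fonctions.py | orf_aux
-- ===== SOURCE A (Python) =====
-- def orf_aux(seq):  # 6.4 AUX
--     result = []
--     start = 'ATG'
--     stop = ['TAA', 'TAG', 'TGA']
--     begin = False
--     # seq = seq[offset: len(seq)]
--     # print ("From AUX, the sequence is: " + seq)
--     for i in range(0, len(seq), 3):
--         codon = seq[i:i + 3]
--         if (len(codon) % 3 != 0):
--             break
--         if codon == start and begin is False:
--             begin = True
--         if not begin:
--             continue
--         result.append(codon)
--         if codon in stop:
--             break
--     return result
-- ===== SOURCE B (Python) =====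
-- def orf_aux(seq):
--     n = len(seq) - len(seq) % 3
--     codons = [seq[i:i + 3] for i in range(0, n, 3)]
--     try:
--         s = codons.index('ATG')
--     except ValueError:
--         return []
--     result = []
--     for codon in codons[s:]:
--         result.append(codon)
--         if codon in ('TAA', 'TAG', 'TGA'):
--             break
--     return result
-- ===== Notes on version B (the rewrite author's own statement) =====
-- stated objective: alternative
-- what changed: B first builds the list of full codons, locates the start codon with list.index, and then runs a bounded append-until-stop scan over the suffix, replacing A's single flag-guarded loop with slicing inside it.
import Mathlib
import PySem

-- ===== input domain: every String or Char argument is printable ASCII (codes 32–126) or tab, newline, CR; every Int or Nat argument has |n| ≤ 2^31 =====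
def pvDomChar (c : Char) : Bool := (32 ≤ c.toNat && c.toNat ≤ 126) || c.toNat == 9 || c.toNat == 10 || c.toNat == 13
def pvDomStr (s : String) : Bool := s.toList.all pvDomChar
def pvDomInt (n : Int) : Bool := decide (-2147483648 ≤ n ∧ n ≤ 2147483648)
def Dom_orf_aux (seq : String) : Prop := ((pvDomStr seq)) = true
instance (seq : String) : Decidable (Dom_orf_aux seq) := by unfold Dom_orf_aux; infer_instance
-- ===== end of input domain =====

-- B replaces A's single flag-guarded loop by build-codon-list, index the start, then a bounded append-until-stop scan (alternative decomposition, same cost).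

-- ===== PORT A =====
-- the for-loop over range(0, len(seq), 3) with state (result, begin) and two breaks
def orfA_loop (cs : List Char) : List Int → List String → Bool → List String
  | [], result, _ => result
  | i :: is, result, begin_ =>
    let codon := PySem.List.slice cs (some i) (some (i + 3))
    if codon.length % 3 ≠ 0 then result
    else
      let begin' := if codon = "ATG".toList ∧ begin_ = false then true else begin_
      if begin' = false then orfA_loop cs is result begin'
      else
        let result' := result ++ [String.ofList codon]
        if codon ∈ ["TAA".toList, "TAG".toList, "TGA".toList] then result'
        else orfA_loop cs is result' begin'

def orf_aux (seq : String) : List String :=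
  orfA_loop seq.toList (PySem.List.pyRange 0 (PySem.Str.len seq) 3) [] false

-- ===== PORT B =====
-- the append-until-stop scan over codons[s:]
def orfB_scan : List (List Char) → List String → List String
  | [], result => result
  | c :: rest, result =>
    let result' := result ++ [String.ofList c]
    if c ∈ ["TAA".toList, "TAG".toList, "TGA".toList] then result'
    else orfB_scan rest result'

def orf_aux_alt (seq : String) : List String :=
  let cs := seq.toList
  let n : Int := PySem.Str.len seq - PySem.Int.mod (PySem.Str.len seq) 3
  let codons := (PySem.List.pyRange 0 n 3).map
    (fun i => PySem.List.slice cs (some i) (some (i + 3)))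
  match PySem.List.index? codons "ATG".toList with
  | none => []
  | some s => orfB_scan (PySem.List.slice codons (some (s : Int)) none) []

-- ===== PRECONDITION & SPEC =====
def Spec_orf_aux (seq : String) (out : List String) : Prop := out = orf_aux_alt seq
instance (seq : String) (out : List String) : Decidable (Spec_orf_aux seq out) := by unfold Spec_orf_aux; infer_instance

-- ===== CLAIM (what is proved, stated in full; the proofs are below) =====
def Claim_equal_orf_aux : Prop := ∀ (seq : String), Dom_orf_aux seq → Spec_orf_aux seq (orf_aux seq)

-- ===== LEMMAS AND PROOFS =====

-- reference recursion for A: consume full codons off the front; a tail shorter than 3 (or empty) returns result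
def chunkA (cs : List Char) (result : List String) (begin_ : Bool) : List String :=
  if _h : cs.length < 3 then result
  else
    let codon := cs.take 3
    let begin' := if codon = "ATG".toList ∧ begin_ = false then true else begin_
    if begin' = false then chunkA (cs.drop 3) result begin'
    else
      let result' := result ++ [String.ofList codon]
      if codon ∈ ["TAA".toList, "TAG".toList, "TGA".toList] then result'
      else chunkA (cs.drop 3) result' begin'
  termination_by cs.length
  decreasing_by all_goals (simp only [List.length_drop]; omega)

-- the full 3-codon list of cs
def fullChunks (cs : List Char) : List (List Char) :=
  if _h : cs.length < 3 then []
  else cs.take 3 :: fullChunks (cs.drop 3)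
  termination_by cs.length
  decreasing_by simp only [List.length_drop]; omega

-- chunkA restated over the codon list
def chunkList : List (List Char) → List String → Bool → List String
  | [], result, _ => result
  | c :: rest, result, begin_ =>
    let begin' := if c = "ATG".toList ∧ begin_ = false then true else begin_
    if begin' = false then chunkList rest result begin'
    else
      let result' := result ++ [String.ofList c]
      if c ∈ ["TAA".toList, "TAG".toList, "TGA".toList] then result'
      else chunkList rest result' begin'

lemma pyRange3_nil {a b : Int} (h : b ≤ a) : PySem.List.pyRange a b 3 = [] := by
  rw [PySem.List.pyRange_of_pos a b (by norm_num)]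
  simp [show ¬ a < b by omega]

lemma pyRange3_cons {a b : Int} (h : a < b) :
    PySem.List.pyRange a b 3 = a :: PySem.List.pyRange (a + 3) b 3 := by
  rw [PySem.List.pyRange_of_pos a b (by norm_num),
      PySem.List.pyRange_of_pos (a + 3) b (by norm_num)]
  have hm : (if a < b then ((b - a + 3 - 1) / 3).toNat else 0)
      = (if a + 3 < b then ((b - (a + 3) + 3 - 1) / 3).toNat else 0) + 1 := by
    split_ifs <;> omega
  rw [hm, List.range_succ_eq_map]
  simp only [List.map_cons, List.map_map, Nat.cast_zero, mul_zero, add_zero]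
  congr 1
  apply List.map_congr_left; intro k _; simp [Function.comp]; ring

lemma pyRange3_shift (a b : Int) :
    PySem.List.pyRange (a + 3) (b + 3) 3 = (PySem.List.pyRange a b 3).map (· + 3) := by
  rw [PySem.List.pyRange_of_pos a b (by norm_num),
      PySem.List.pyRange_of_pos (a + 3) (b + 3) (by norm_num)]
  have : (if a + 3 < b + 3 then ((b + 3 - (a + 3) + 3 - 1) / 3).toNat else 0)
      = (if a < b then ((b - a + 3 - 1) / 3).toNat else 0) := by split_ifs <;> omega
  rw [this, List.map_map]
  apply List.map_congr_left; intro k _; simp [Function.comp]; ring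

lemma take3_drop (cs : List Char) (i : Int) (h0 : 0 ≤ i) :
    PySem.List.slice cs (some i) (some (i + 3)) = (cs.drop i.toNat).take 3 := by
  rw [PySem.List.slice_toNat cs h0 (by omega)]
  congr 1
  omega

lemma loopA_eq_chunkA (cs : List Char) :
    ∀ (fuel : Nat) (i : Int), 0 ≤ i → cs.length ≤ i.toNat + fuel →
    ∀ result begin_,
      orfA_loop cs (PySem.List.pyRange i (cs.length : Int) 3) result begin_
        = chunkA (cs.drop i.toNat) result begin_ := by
  intro fuel
  induction fuel with
  | zero =>
    intro i h0 hle result begin_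
    have hba : (cs.length : Int) ≤ i := by omega
    rw [pyRange3_nil hba]
    rw [List.drop_eq_nil_of_le (by omega)]
    rw [chunkA]
    simp [orfA_loop]
  | succ fuel ih =>
    intro i h0 hle result begin_
    by_cases hlt : i < (cs.length : Int)
    · rw [pyRange3_cons hlt]
      have htk := take3_drop cs i h0
      have hdl : (cs.drop i.toNat).length = cs.length - i.toNat := by simp
      have hne : i.toNat < cs.length := by omega
      rw [chunkA]
      simp only [orfA_loop, htk]
      by_cases hsh : cs.length - i.toNat < 3
      · -- partial tail codon: A breaks, chunkA returns result
        have hlen : ((cs.drop i.toNat).take 3).length = cs.length - i.toNat := by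
          simp; omega
        rw [if_pos (by rw [hlen]; omega : ¬ ((cs.drop i.toNat).take 3).length % 3 = 0)]
        rw [dif_pos (by rw [hdl]; omega : (cs.drop i.toNat).length < 3)]
      · have hlen : ((cs.drop i.toNat).take 3).length = 3 := by simp; omega
        rw [if_neg (by rw [hlen]; omega : ¬ ¬ ((cs.drop i.toNat).take 3).length % 3 = 0)]
        rw [dif_neg (by rw [hdl]; omega : ¬ (cs.drop i.toNat).length < 3)]
        have ih' := fun r b => ih (i + 3) (by omega) (by omega) r b
        have hdd : List.drop 3 (List.drop i.toNat cs) = cs.drop (i + 3).toNat := by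
          rw [List.drop_drop]; congr 1; omega
        simp only [ih', hdd]
    · have hba : (cs.length : Int) ≤ i := by omega
      rw [pyRange3_nil hba]
      rw [List.drop_eq_nil_of_le (by omega)]
      try simp [orfA_loop, chunkA]

-- the codon list B builds is fullChunks
lemma codons_eq_fullChunks (cs : List Char) :
    ∀ (fuel : Nat), cs.length ≤ fuel →
    (PySem.List.pyRange 0 ((cs.length : Int) - PySem.Int.mod (cs.length : Int) 3) 3).map
        (fun i => PySem.List.slice cs (some i) (some (i + 3)))
      = fullChunks cs := by
  induction cs using fullChunks.induct with
  | case1 cs h =>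
    intro fuel _
    rw [fullChunks, dif_pos h]
    have hmod : PySem.Int.mod (cs.length : Int) 3 = ((cs.length % 3 : Nat) : Int) := by
      exact_mod_cast PySem.Int.mod_natCast cs.length 3
    have : (cs.length : Int) - PySem.Int.mod (cs.length : Int) 3 = 0 := by omega
    rw [this, pyRange3_nil (by omega)]
    simp
  | case2 cs h ih =>
    intro fuel hf
    rw [fullChunks, dif_neg h]
    have hmod : PySem.Int.mod (cs.length : Int) 3 = ((cs.length % 3 : Nat) : Int) := by
      exact_mod_cast PySem.Int.mod_natCast cs.length 3
    set n : Int := (cs.length : Int) - PySem.Int.mod (cs.length : Int) 3 with hn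
    have hn3 : 3 ≤ n := by rw [hn, hmod]; omega
    rw [pyRange3_cons (by omega : (0:Int) < n)]
    simp only [List.map_cons, List.cons.injEq]
    constructor
    · rw [take3_drop cs 0 le_rfl]; simp
    · have hshift : PySem.List.pyRange 3 n 3
          = (PySem.List.pyRange 0 (n - 3) 3).map (· + 3) := by
        have := pyRange3_shift 0 (n - 3)
        simpa using this
      rw [(by norm_num : (0:Int) + 3 = 3), hshift, List.map_map]
      have hdl : ((cs.drop 3).length : Int) - PySem.Int.mod ((cs.drop 3).length : Int) 3
          = n - 3 := by
        have h2 : PySem.Int.mod ((cs.drop 3).length : Int) 3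
            = (((cs.drop 3).length % 3 : Nat) : Int) := by
          exact_mod_cast PySem.Int.mod_natCast (cs.drop 3).length 3
        rw [h2, hn, hmod]
        simp only [List.length_drop]
        omega
      have ih' := ih cs.length (by simp)
      rw [hdl] at ih'
      rw [← ih']
      apply List.map_congr_left
      intro j hj
      have hj0 : 0 ≤ j := by
        rw [PySem.List.mem_pyRange_iff_of_pos (by norm_num)] at hj
        omega
      simp only [Function.comp]
      rw [take3_drop cs (j + 3) (by omega), take3_drop (cs.drop 3) j hj0]
      rw [List.drop_drop]
      congr 2
      try omega

lemma chunkA_eq_chunkList (cs : List Char) :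
    ∀ result begin_, chunkA cs result begin_ = chunkList (fullChunks cs) result begin_ := by
  induction cs using fullChunks.induct with
  | case1 cs h =>
    intro result begin_
    rw [fullChunks, dif_pos h, chunkA, dif_pos h]
    rfl
  | case2 cs h ih =>
    intro result begin_
    rw [fullChunks, dif_neg h, chunkA, dif_neg h]
    simp only [chunkList]
    split_ifs <;> first | rfl | exact ih _ _

lemma chunkList_true_eq_scan (L : List (List Char)) :
    ∀ result, chunkList L result true = orfB_scan L result := by
  induction L with
  | nil => intro result; rfl
  | cons c rest ih =>
    intro result
    simp only [chunkList, orfB_scan]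
    rw [if_neg (by simp : ¬ (c = "ATG".toList ∧ (true : Bool) = false))]
    rw [if_neg (by simp : ¬ ((true : Bool) = false))]
    split_ifs with hs
    · rfl
    · exact ih _

lemma chunkList_false_eq_index (L : List (List Char)) :
    chunkList L [] false
      = match PySem.List.index? L "ATG".toList with
        | none => []
        | some s => orfB_scan (L.drop s) [] := by
  induction L with
  | nil => rfl
  | cons c rest ih =>
    by_cases hc : c = "ATG".toList
    · subst hc
      rw [PySem.List.index?_cons_self]
      simp only [List.drop_zero]
      rw [show chunkList ("ATG".toList :: rest) [] false
            = chunkList rest [String.ofList "ATG".toList] true from by simp [chunkList]]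
      rw [show orfB_scan ("ATG".toList :: rest) []
            = orfB_scan rest [String.ofList "ATG".toList] from by simp [orfB_scan]]
      exact chunkList_true_eq_scan rest _
    · rw [PySem.List.index?_cons_of_ne rest hc]
      have hc' : ¬ c = ['A', 'T', 'G'] := by simpa using hc
      rw [show chunkList (c :: rest) [] false = chunkList rest [] false from by
            simp [chunkList, hc']]
      rw [ih]
      cases hidx : PySem.List.index? rest "ATG".toList with
      | none => simp
      | some s => simp

-- ===== VERDICT (by name: the statement is the Claim_ definition above) =====
theorem orf_aux_spec : Claim_equal_orf_aux := by
  intro seq _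
  unfold Spec_orf_aux orf_aux orf_aux_alt
  set cs := seq.toList with hcs
  rw [PySem.Str.len_eq]
  rw [loopA_eq_chunkA cs cs.length 0 le_rfl (by simp)]
  simp only [Int.toNat_zero, List.drop_zero]
  rw [chunkA_eq_chunkList]
  rw [codons_eq_fullChunks cs cs.length le_rfl]
  rw [chunkList_false_eq_index]
  cases hidx : PySem.List.index? (fullChunks cs) "ATG".toList with
  | none => rfl
  | some s =>
    simp only
    rw [PySem.List.slice_from (fullChunks cs) (by omega : (0:Int) ≤ (s:Int))]
    simp
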